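-- pv_equiv track=rewrite | github.com/teekaytai/competitive-programming | Codeforces/Good Bye 2024/C. Bewitching Stargazer/main.py | f
-- ===== SOURCE A (Python) =====
-- def f(n, k):
--     if n < k: return 0, 0
--     m = (n + 1) // 2
--     if n % 2 == 0:
--         x, y = f(m, k)
--         # printerr(n, 2 * x, 2 * y + x * m)
--         return 2 * x, 2 * y + x * m
--     x, y = f(m - 1, k)
--     # printerr(n, 2 * x + 1, 2 * y + x * m + m)
--     return 2 * x + 1, 2 * y + x * m + m
-- ===== SOURCE B (Python) =====
-- def f(n, k):
--     # Iterative two-phase version: record the chain of n values going down,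
--     # then fold the combine step back up from the deepest level.
--     levels = []
--     while n >= k:
--         levels.append(n)
--         n = n // 2
--     x, y = 0, 0
--     for cur in reversed(levels):
--         m = (cur + 1) // 2
--         if cur % 2 == 0:
--             x, y = 2 * x, 2 * y + x * m
--         else:
--             x, y = 2 * x + 1, 2 * y + x * m + m
--     return x, y
-- ===== Notes on version B (the rewrite author's own statement) =====
-- stated objective: alternative
-- what changed: Replaced the direct recursion by an explicit two-phase iteration: a descent loop records each level's n (halving each step), then a reverse fold applies the even/odd combine step from the deepest level up; Pre_ excludes n >= k with k <= 0, where A raises RecursionError (and B's loop would not terminate either).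
import Mathlib
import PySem

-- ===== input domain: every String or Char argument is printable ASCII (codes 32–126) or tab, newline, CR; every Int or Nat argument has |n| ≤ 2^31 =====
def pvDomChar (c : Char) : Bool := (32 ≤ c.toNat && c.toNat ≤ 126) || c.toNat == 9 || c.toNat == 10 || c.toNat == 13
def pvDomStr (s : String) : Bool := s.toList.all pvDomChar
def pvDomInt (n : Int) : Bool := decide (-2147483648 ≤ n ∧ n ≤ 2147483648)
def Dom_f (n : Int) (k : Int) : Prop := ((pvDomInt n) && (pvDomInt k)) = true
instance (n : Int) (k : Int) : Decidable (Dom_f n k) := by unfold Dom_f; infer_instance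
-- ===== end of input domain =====

-- B replaces A's recursion by a descent loop recording levels plus a reverse fold combining them; same cost, different decomposition.

-- ===== PORT A =====
-- A's recursion may not terminate (n ≥ k with k ≤ 0), so the port carries a fuel
-- parameter; fuel n.toNat + 1 suffices on Pre_f (n strictly halves while n ≥ 1).
def fFuel : Nat → Int → Int → Int × Int
  | 0, _, _ => (0, 0)
  | fuel + 1, n, k =>
    if n < k then (0, 0)
    else
      let m := PySem.Int.floordiv (n + 1) 2
      if PySem.Int.mod n 2 = 0 then
        let p := fFuel fuel m k
        (2 * p.1, 2 * p.2 + p.1 * m)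
      else
        let p := fFuel fuel (m - 1) k
        (2 * p.1 + 1, 2 * p.2 + p.1 * m + m)

def f (n : Int) (k : Int) : Int × Int := fFuel (n.toNat + 1) n k

-- ===== PORT B =====
-- descent loop: record each level's n while n ≥ k, halving n each step (fuel as above)
def fLevels : Nat → Int → Int → List Int
  | 0, _, _ => []
  | fuel + 1, n, k =>
    if n < k then []
    else n :: fLevels fuel (PySem.Int.floordiv n 2) k

-- one combine step of B's reverse fold
def fStep (xy : Int × Int) (cur : Int) : Int × Int :=
  let m := PySem.Int.floordiv (cur + 1) 2
  if PySem.Int.mod cur 2 = 0 then (2 * xy.1, 2 * xy.2 + xy.1 * m)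
  else (2 * xy.1 + 1, 2 * xy.2 + xy.1 * m + m)

def f_alt (n : Int) (k : Int) : Int × Int :=
  ((fLevels (n.toNat + 1) n k).reverse).foldl fStep (0, 0)

-- ===== PRECONDITION & SPEC =====
-- Pre_f excludes exactly n ≥ k with k ≤ 0, where Python A raises RecursionError (infinite descent).
def Pre_f (n : Int) (k : Int) : Prop := n < k ∨ 1 ≤ k
instance (n : Int) (k : Int) : Decidable (Pre_f n k) := by unfold Pre_f; infer_instance
def pvWitness_f : Int × Int := (10, 3)

def Spec_f (n : Int) (k : Int) (out : Int × Int) : Prop := out = f_alt n k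
instance (n : Int) (k : Int) (out : Int × Int) : Decidable (Spec_f n k out) := by unfold Spec_f; infer_instance

-- ===== CLAIM (what is proved, stated in full; the proofs are below) =====
def Claim_equal_f : Prop := ∀ (n : Int) (k : Int), Dom_f n k → Pre_f n k → Spec_f n k (f n k)

-- ===== LEMMAS AND PROOFS =====

-- Core invariant: with enough fuel and k ≥ 1, A's recursion equals B's reverse fold over the level list.
lemma fFuel_eq_fold (fuel : Nat) : ∀ (n k : Int), 1 ≤ k → n.toNat < fuel →
    fFuel fuel n k = ((fLevels fuel n k).reverse).foldl fStep (0, 0) := by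
  induction fuel with
  | zero => intro n k _ h; omega
  | succ fuel ih =>
    intro n k hk hfuel
    by_cases hnk : n < k
    · simp [fFuel, fLevels, hnk]
    · have hn1 : 1 ≤ n := by omega
      have hhalf : PySem.Int.floordiv n 2 = n / 2 := PySem.Int.floordiv_eq_ediv_of_pos (by norm_num)
      have hrec : (PySem.Int.floordiv n 2).toNat < fuel := by
        have := Int.ediv_le_self n (by omega : (0:Int) ≤ n)
        have : n / 2 < n := by omega
        omega
      have hih := ih (PySem.Int.floordiv n 2) k hk hrec
      rw [show fLevels (fuel + 1) n k = n :: fLevels fuel (PySem.Int.floordiv n 2) k from by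
        simp [fLevels, hnk]]
      rw [List.reverse_cons, List.foldl_append, ← hih]
      by_cases hpar : n % 2 = 0
      · simp [fFuel, fStep, hnk, hpar, List.foldl,
          show (n + 1) / 2 = n / 2 from by omega]
      · simp [fFuel, fStep, hnk, hpar, List.foldl,
          show (n + 1) / 2 - 1 = n / 2 from by omega]

-- ===== VERDICT (by name: the statement is the Claim_ definition above) =====
theorem f_spec : Claim_equal_f := by
  intro n k _ hpre
  unfold Spec_f f f_alt
  rcases hpre with hlt | hk
  · simp [fFuel, fLevels, hlt]
  · exact fFuel_eq_fold (n.toNat + 1) n k hk (by omega)
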